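-- pv_equiv track=rewrite | github.com/YashReddy1963/pralay-backend | Pralay/ai_verification_service.py | is_hazard_type_compatible
-- ===== SOURCE A (Python) =====
-- def is_hazard_type_compatible(selected_type: str, detected_type: str) -> bool:
--     """
--     Check if two hazard types are compatible (related or same).
--
--     Args:
--         selected_type: User-selected hazard type
--         detected_type: AI-detected hazard type
--
--     Returns:
--         True if types are compatible, False otherwise
--     """
--     # Exact match
--     if selected_type == detected_type:
--         return True
--
--     # Define compatible hazard type groups
--     compatible_groups = {
--         # Water-related hazards
--         'water_hazards': ['flooding', 'storm-surge', 'high-waves', 'tsunami'],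
--
--         # Weather-related hazards
--         'weather_hazards': ['storm-surge', 'tsunami', 'high-waves'],
--
--         # Environmental hazards
--         'environmental_hazards': ['pollution', 'debris', 'erosion'],
--
--         # Marine hazards
--         'marine_hazards': ['wildlife', 'pollution', 'debris']
--     }
--
--     # Check if both types are in the same compatible group
--     for group_name, types in compatible_groups.items():
--         if selected_type in types and detected_type in types:
--             return True
--
--     # Special cases for very similar hazard types
--     similar_pairs = [
--         ('flooding', 'storm-surge'),
--         ('storm-surge', 'high-waves'),
--         ('high-waves', 'tsunami'),
--         ('pollution', 'debris'),
--         ('erosion', 'debris')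
--     ]
--
--     for pair in similar_pairs:
--         if (selected_type == pair[0] and detected_type == pair[1]) or \
--            (selected_type == pair[1] and detected_type == pair[0]):
--             return True
--
--     # If no compatibility found, be more lenient for ocean-related content
--     ocean_related = ['flooding', 'storm-surge', 'high-waves', 'tsunami', 'pollution', 'debris', 'erosion']
--     if selected_type in ocean_related and detected_type in ocean_related:
--         # For ocean-related hazards, be more lenient if confidence is high
--         return True
--
--     return False
-- ===== SOURCE B (Python) =====
-- # One precomputed symmetric compatibility relation (set of frozensets) instead of
-- # A's four sequential scans: all unordered pairs of ocean-related types (A's lenient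
-- # fallback makes every such pair compatible) plus the two wildlife pairs from the
-- # marine group.
-- _OCEAN = ('flooding', 'storm-surge', 'high-waves', 'tsunami', 'pollution', 'debris', 'erosion')
-- _COMPAT = {frozenset((a, b)) for a in _OCEAN for b in _OCEAN if a != b}
-- _COMPAT |= {frozenset(('wildlife', 'pollution')), frozenset(('wildlife', 'debris'))}
--
-- def is_hazard_type_compatible(selected_type: str, detected_type: str) -> bool:
--     return selected_type == detected_type or frozenset((selected_type, detected_type)) in _COMPAT
-- ===== Notes on version B (the rewrite author's own statement) =====
-- stated objective: simpler
-- what changed: Replaced A's four sequential scans (dict of groups, similar-pairs list, ocean fallback) with one precomputed symmetric compatibility relation (set of frozenset pairs) and a single O(1) membership test.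
import Mathlib
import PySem

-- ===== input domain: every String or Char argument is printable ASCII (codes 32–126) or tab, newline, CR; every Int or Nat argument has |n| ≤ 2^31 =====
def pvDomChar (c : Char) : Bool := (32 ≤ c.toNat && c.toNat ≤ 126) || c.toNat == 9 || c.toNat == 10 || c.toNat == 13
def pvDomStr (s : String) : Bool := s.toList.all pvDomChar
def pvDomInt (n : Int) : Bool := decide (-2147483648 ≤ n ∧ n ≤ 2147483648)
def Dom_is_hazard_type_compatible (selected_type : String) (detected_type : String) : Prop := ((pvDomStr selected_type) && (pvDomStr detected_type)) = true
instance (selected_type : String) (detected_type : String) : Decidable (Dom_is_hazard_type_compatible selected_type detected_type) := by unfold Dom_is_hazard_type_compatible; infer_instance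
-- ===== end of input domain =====

-- B replaces A's four sequential scans by one precomputed symmetric pair relation and a single membership test (simpler).

-- ===== PORT A =====
def pvGroupsA : List (String × List String) :=
  [("water_hazards", ["flooding", "storm-surge", "high-waves", "tsunami"]),
   ("weather_hazards", ["storm-surge", "tsunami", "high-waves"]),
   ("environmental_hazards", ["pollution", "debris", "erosion"]),
   ("marine_hazards", ["wildlife", "pollution", "debris"])]

def pvSimilarA : List (String × String) :=
  [("flooding", "storm-surge"), ("storm-surge", "high-waves"), ("high-waves", "tsunami"),
   ("pollution", "debris"), ("erosion", "debris")]

def pvOceanA : List String :=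
  ["flooding", "storm-surge", "high-waves", "tsunami", "pollution", "debris", "erosion"]

-- the for-loops with early 'return True' are List.any over the same lists
def is_hazard_type_compatible (selected_type : String) (detected_type : String) : Bool :=
  if selected_type == detected_type then true
  else if pvGroupsA.any (fun g => g.2.contains selected_type && g.2.contains detected_type) then true
  else if pvSimilarA.any (fun p =>
      (selected_type == p.1 && detected_type == p.2) ||
      (selected_type == p.2 && detected_type == p.1)) then true
  else if pvOceanA.contains selected_type && pvOceanA.contains detected_type then true
  else false

-- ===== PORT B =====
def pvOceanB : List String :=
  ["flooding", "storm-surge", "high-waves", "tsunami", "pollution", "debris", "erosion"]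

-- the set of frozensets _COMPAT: each frozenset {a,b} (a ≠ b) is modeled as the ordered
-- pair (a,b); membership of frozenset((s,d)) is a symmetric match against a pair
def pvCompatB : List (String × String) :=
  (pvOceanB.flatMap (fun a => (pvOceanB.filter (fun b => a != b)).map (fun b => (a, b))))
    ++ [("wildlife", "pollution"), ("wildlife", "debris")]

def is_hazard_type_compatible_alt (selected_type : String) (detected_type : String) : Bool :=
  selected_type == detected_type ||
    pvCompatB.any (fun p =>
      (selected_type == p.1 && detected_type == p.2) ||
      (selected_type == p.2 && detected_type == p.1))

-- ===== PRECONDITION & SPEC =====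
def Spec_is_hazard_type_compatible (selected_type : String) (detected_type : String) (out : Bool) : Prop := out = is_hazard_type_compatible_alt selected_type detected_type
instance (selected_type : String) (detected_type : String) (out : Bool) : Decidable (Spec_is_hazard_type_compatible selected_type detected_type out) := by unfold Spec_is_hazard_type_compatible; infer_instance

-- ===== CLAIM (what is proved, stated in full; the proofs are below) =====
def Claim_equal_is_hazard_type_compatible : Prop := ∀ (selected_type : String) (detected_type : String), Dom_is_hazard_type_compatible selected_type detected_type → Spec_is_hazard_type_compatible selected_type detected_type (is_hazard_type_compatible selected_type detected_type)

-- ===== LEMMAS AND PROOFS =====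

-- classify a string by which of the 8 relevant hazard names it is (8 = none of them)
def pvIdx (s : String) : Nat :=
  if s == "flooding" then 0
  else if s == "storm-surge" then 1
  else if s == "high-waves" then 2
  else if s == "tsunami" then 3
  else if s == "pollution" then 4
  else if s == "debris" then 5
  else if s == "erosion" then 6
  else if s == "wildlife" then 7
  else 8

theorem pvIdx_le (s : String) : pvIdx s ≤ 8 := by
  unfold pvIdx; split_ifs <;> omega

theorem pvIdx_eq0 (s : String) : (s == "flooding") = (pvIdx s == 0) := by
  unfold pvIdx; split_ifs <;> simp_all
theorem pvIdx_eq1 (s : String) : (s == "storm-surge") = (pvIdx s == 1) := by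
  unfold pvIdx; split_ifs <;> simp_all
theorem pvIdx_eq2 (s : String) : (s == "high-waves") = (pvIdx s == 2) := by
  unfold pvIdx; split_ifs <;> simp_all
theorem pvIdx_eq3 (s : String) : (s == "tsunami") = (pvIdx s == 3) := by
  unfold pvIdx; split_ifs <;> simp_all
theorem pvIdx_eq4 (s : String) : (s == "pollution") = (pvIdx s == 4) := by
  unfold pvIdx; split_ifs <;> simp_all
theorem pvIdx_eq5 (s : String) : (s == "debris") = (pvIdx s == 5) := by
  unfold pvIdx; split_ifs <;> simp_all
theorem pvIdx_eq6 (s : String) : (s == "erosion") = (pvIdx s == 6) := by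
  unfold pvIdx; split_ifs <;> simp_all
theorem pvIdx_eq7 (s : String) : (s == "wildlife") = (pvIdx s == 7) := by
  unfold pvIdx; split_ifs <;> simp_all


theorem pvIdx_val0 (x : String) (hx : pvIdx x = 0) : x = "flooding" := by
  have e := pvIdx_eq0 x; rw [hx] at e; simpa using e
theorem pvIdx_val1 (x : String) (hx : pvIdx x = 1) : x = "storm-surge" := by
  have e := pvIdx_eq1 x; rw [hx] at e; simpa using e
theorem pvIdx_val2 (x : String) (hx : pvIdx x = 2) : x = "high-waves" := by
  have e := pvIdx_eq2 x; rw [hx] at e; simpa using e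
theorem pvIdx_val3 (x : String) (hx : pvIdx x = 3) : x = "tsunami" := by
  have e := pvIdx_eq3 x; rw [hx] at e; simpa using e
theorem pvIdx_val4 (x : String) (hx : pvIdx x = 4) : x = "pollution" := by
  have e := pvIdx_eq4 x; rw [hx] at e; simpa using e
theorem pvIdx_val5 (x : String) (hx : pvIdx x = 5) : x = "debris" := by
  have e := pvIdx_eq5 x; rw [hx] at e; simpa using e
theorem pvIdx_val6 (x : String) (hx : pvIdx x = 6) : x = "erosion" := by
  have e := pvIdx_eq6 x; rw [hx] at e; simpa using e
theorem pvIdx_val7 (x : String) (hx : pvIdx x = 7) : x = "wildlife" := by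
  have e := pvIdx_eq7 x; rw [hx] at e; simpa using e

theorem pvIdx_inj (s d : String) (h8 : pvIdx s ≠ 8) (h : pvIdx s = pvIdx d) : s = d := by
  have hle := pvIdx_le s
  have hk : pvIdx s = 0 ∨ pvIdx s = 1 ∨ pvIdx s = 2 ∨ pvIdx s = 3 ∨ pvIdx s = 4 ∨
      pvIdx s = 5 ∨ pvIdx s = 6 ∨ pvIdx s = 7 ∨ pvIdx s = 8 := by omega
  rcases hk with hk|hk|hk|hk|hk|hk|hk|hk|hk
  · rw [pvIdx_val0 s hk, pvIdx_val0 d (h ▸ hk)]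
  · rw [pvIdx_val1 s hk, pvIdx_val1 d (h ▸ hk)]
  · rw [pvIdx_val2 s hk, pvIdx_val2 d (h ▸ hk)]
  · rw [pvIdx_val3 s hk, pvIdx_val3 d (h ▸ hk)]
  · rw [pvIdx_val4 s hk, pvIdx_val4 d (h ▸ hk)]
  · rw [pvIdx_val5 s hk, pvIdx_val5 d (h ▸ hk)]
  · rw [pvIdx_val6 s hk, pvIdx_val6 d (h ▸ hk)]
  · rw [pvIdx_val7 s hk, pvIdx_val7 d (h ▸ hk)]
  · exact absurd hk h8

theorem pvCompatB_eval : pvCompatB =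
  [("flooding", "storm-surge"), ("flooding", "high-waves"), ("flooding", "tsunami"),
   ("flooding", "pollution"), ("flooding", "debris"), ("flooding", "erosion"),
   ("storm-surge", "flooding"), ("storm-surge", "high-waves"), ("storm-surge", "tsunami"),
   ("storm-surge", "pollution"), ("storm-surge", "debris"), ("storm-surge", "erosion"),
   ("high-waves", "flooding"), ("high-waves", "storm-surge"), ("high-waves", "tsunami"),
   ("high-waves", "pollution"), ("high-waves", "debris"), ("high-waves", "erosion"),
   ("tsunami", "flooding"), ("tsunami", "storm-surge"), ("tsunami", "high-waves"),
   ("tsunami", "pollution"), ("tsunami", "debris"), ("tsunami", "erosion"),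
   ("pollution", "flooding"), ("pollution", "storm-surge"), ("pollution", "high-waves"),
   ("pollution", "tsunami"), ("pollution", "debris"), ("pollution", "erosion"),
   ("debris", "flooding"), ("debris", "storm-surge"), ("debris", "high-waves"),
   ("debris", "tsunami"), ("debris", "pollution"), ("debris", "erosion"),
   ("erosion", "flooding"), ("erosion", "storm-surge"), ("erosion", "high-waves"),
   ("erosion", "tsunami"), ("erosion", "pollution"), ("erosion", "debris"),
   ("wildlife", "pollution"), ("wildlife", "debris")] := by decide

-- ===== VERDICT (by name: the statement is the Claim_ definition above) =====
theorem is_hazard_type_compatible_spec : Claim_equal_is_hazard_type_compatible := by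
  unfold Claim_equal_is_hazard_type_compatible Spec_is_hazard_type_compatible
  intro s d _
  by_cases h : s = d
  · subst h
    simp [is_hazard_type_compatible, is_hazard_type_compatible_alt]
  · have hb : (s == d) = false := by simp [h]
    have hs := pvIdx_le s
    have hd := pvIdx_le d
    rw [is_hazard_type_compatible, is_hazard_type_compatible_alt, pvCompatB_eval]
    simp only [pvGroupsA, pvSimilarA, pvOceanA,
      List.any_cons, List.any_nil, List.contains_cons, List.contains_nil, hb,
      pvIdx_eq0, pvIdx_eq1, pvIdx_eq2, pvIdx_eq3, pvIdx_eq4, pvIdx_eq5, pvIdx_eq6, pvIdx_eq7]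
    have hne : pvIdx s ≠ pvIdx d ∨ pvIdx s = 8 := by
      by_cases h8 : pvIdx s = 8
      · exact Or.inr h8
      · exact Or.inl (fun he => h (pvIdx_inj s d h8 he))
    revert hne hs hd
    generalize pvIdx s = a
    generalize pvIdx d = b
    intro hs hd
    interval_cases a <;> interval_cases b <;> decide
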